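-- pv_equiv track=rewrite | github.com/Billybar/py-exam | 24b_m-81/q1.py | biggest_sum
-- ===== SOURCE A (Python) =====
-- def biggest_sum(lst):
--     zero_indices = []
--     # Find all indices where 0 appears
--     for i in range(len(lst)):
--         if lst[i] == 0:
--             zero_indices.append(i)
--
--     # Initialize with a value lower than any possible sum (sums are non-negative)
--     max_segment_sum = -1
--
--     # Iterate through consecutive pairs of zero indices
--     for i in range(len(zero_indices) - 1):
--         start_zero_idx = zero_indices[i]
--         end_zero_idx = zero_indices[i+1]
--
--         current_segment_sum = 0
--         # Sum the numbers strictly between the two zeros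
--         for j in range(start_zero_idx + 1, end_zero_idx):
--             current_segment_sum += lst[j]
--
--         # Update the maximum sum if the current segment's sum is greater
--         if current_segment_sum > max_segment_sum:
--             max_segment_sum = current_segment_sum
--
--     return max_segment_sum
-- ===== SOURCE B (Python) =====
-- def biggest_sum(lst):
--     # single streaming pass: no index list, no nested loop
--     mx = -1
--     cur = 0
--     seen = False
--     for x in lst:
--         if x == 0:
--             if seen and cur > mx:
--                 mx = cur
--             seen = True
--             cur = 0
--         else:
--             cur += x
--     return mx
-- ===== Notes on version B (the rewrite author's own statement) =====
-- stated objective: simpler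
-- what changed: Replaced the index-collecting pass plus nested loop over consecutive zero-index pairs by a single streaming pass that keeps a running segment sum, a seen-first-zero flag and the running maximum.
import Mathlib
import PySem

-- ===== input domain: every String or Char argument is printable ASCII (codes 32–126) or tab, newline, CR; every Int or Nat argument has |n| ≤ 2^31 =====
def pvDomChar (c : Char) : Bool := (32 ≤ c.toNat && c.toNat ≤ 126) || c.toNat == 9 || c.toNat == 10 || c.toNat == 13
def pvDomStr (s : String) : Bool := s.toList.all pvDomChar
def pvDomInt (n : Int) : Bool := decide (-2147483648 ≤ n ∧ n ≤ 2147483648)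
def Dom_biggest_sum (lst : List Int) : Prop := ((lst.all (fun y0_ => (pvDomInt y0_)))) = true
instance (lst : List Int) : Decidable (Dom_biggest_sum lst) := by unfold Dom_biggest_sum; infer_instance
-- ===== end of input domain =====

-- B replaces A's zero-index list and nested segment loops by one streaming pass (objective: simpler).

-- ===== PORT A =====
def biggest_sum (lst : List Int) : Int :=
  let zero_indices : List Int :=
    (PySem.List.pyRange 0 (lst.length : Int) 1).foldl
      (fun acc i => if PySem.List.pyGetD lst i 0 == 0 then acc ++ [i] else acc) []
  (PySem.List.pyRange 0 ((zero_indices.length : Int) - 1) 1).foldl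
    (fun mx i =>
      let start_zero_idx := PySem.List.pyGetD zero_indices i 0
      let end_zero_idx := PySem.List.pyGetD zero_indices (i + 1) 0
      let s := (PySem.List.pyRange (start_zero_idx + 1) end_zero_idx 1).foldl
        (fun s j => s + PySem.List.pyGetD lst j 0) 0
      if s > mx then s else mx) (-1)

-- ===== PORT B =====
def biggest_sum_alt (lst : List Int) : Int :=
  (lst.foldl
    (fun (st : Int × Int × Bool) x =>
      if x == 0 then
        (if st.2.2 && decide (st.2.1 > st.1) then st.2.1 else st.1, 0, true)
      else
        (st.1, st.2.1 + x, st.2.2))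
    (-1, 0, false)).1

-- ===== PRECONDITION & SPEC =====
def Spec_biggest_sum (lst : List Int) (out : Int) : Prop := out = biggest_sum_alt lst
instance (lst : List Int) (out : Int) : Decidable (Spec_biggest_sum lst out) := by unfold Spec_biggest_sum; infer_instance

-- ===== CLAIM (what is proved, stated in full; the proofs are below) =====
def Claim_equal_biggest_sum : Prop := ∀ (lst : List Int), Dom_biggest_sum lst → Spec_biggest_sum lst (biggest_sum lst)

-- ===== LEMMAS AND PROOFS =====

def sumIdx (lst : List Int) (s e : Nat) : Int :=
  ((List.range (e - s)).map (fun k => lst.getD (s + k) 0)).sum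
def zIdx (lst : List Int) : List Nat :=
  (List.range lst.length).filter (fun i => lst.getD i 0 == 0)
def pairsS (lst : List Int) (z : List Nat) : List Int :=
  (z.zip z.tail).map (fun p => sumIdx lst (p.1 + 1) p.2)

theorem sumIdx_shift (x : Int) (xs : List Int) (s e : Nat) :
    sumIdx (x :: xs) (s + 1) (e + 1) = sumIdx xs s e := by
  unfold sumIdx
  rw [show e + 1 - (s + 1) = e - s from by omega]
  congr 1
  apply List.map_congr_left
  intro k _
  rw [show s + 1 + k = (s + k) + 1 from by omega, List.getD_cons_succ]

theorem sumIdx_zero_succ (x : Int) (xs : List Int) (i : Nat) :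
    sumIdx (x :: xs) 0 (i + 1) = x + sumIdx xs 0 i := by
  unfold sumIdx
  rw [Nat.sub_zero, Nat.sub_zero, List.range_succ_eq_map, List.map_cons, List.map_map,
    List.sum_cons]
  congr 1

theorem zIdx_cons (x : Int) (xs : List Int) :
    zIdx (x :: xs) = (if x = 0 then [0] else []) ++ (zIdx xs).map (· + 1) := by
  unfold zIdx
  rw [List.length_cons, List.range_succ_eq_map, List.filter_cons, List.filter_map]
  have hp : ((fun i => ((x :: xs).getD i 0 == 0)) ∘ Nat.succ) = fun i => (xs.getD i 0 == 0) := by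
    funext i; simp [Function.comp]
  rw [hp]
  by_cases hx : x = 0 <;> simp [hx]

theorem pairsS_shift (x : Int) (xs : List Int) (z : List Nat) :
    pairsS (x :: xs) (z.map (· + 1)) = pairsS xs z := by
  unfold pairsS
  rw [← List.map_tail, List.zip_map, List.map_map]
  apply List.map_congr_left
  intro p _
  simpa using sumIdx_shift x xs (p.1 + 1) p.2

theorem zip_pairs_eq (Z : List Nat) :
    (List.range (Z.length - 1)).map (fun k => (Z.getD k 0, Z.getD (k + 1) 0)) = Z.zip Z.tail := by
  induction Z with
  | nil => simp
  | cons a Z ih =>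
    cases Z with
    | nil => simp
    | cons b t =>
      rw [show (a :: b :: t).length - 1 = (b :: t).length - 1 + 1 from by simp,
        List.range_succ_eq_map, List.map_cons, List.map_map]
      have hmap : ((fun k => ((a :: b :: t).getD k 0, (a :: b :: t).getD (k + 1) 0)) ∘ Nat.succ)
          = fun k => ((b :: t).getD k 0, (b :: t).getD (k + 1) 0) := by
        funext k
        simp [Function.comp]
      rw [hmap, ih]
      simp

theorem zero_indices_eq (lst : List Int) :
    ((PySem.List.pyRange 0 (lst.length : Int) 1).foldl
      (fun acc i => if PySem.List.pyGetD lst i 0 == 0 then acc ++ [i] else acc) []) =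
    (zIdx lst).map (Nat.cast : Nat → Int) := by
  rw [PySem.List.foldl_append_if_eq_filter, PySem.List.pyRange_zero_natCast, List.filter_map]
  unfold zIdx
  simp [Function.comp_def]

theorem inner_sum_eq (lst : List Int) (a b : Nat) :
    (PySem.List.pyRange ((a : Int) + 1) (b : Int) 1).foldl
      (fun s j => s + PySem.List.pyGetD lst j 0) 0 = sumIdx lst (a + 1) b := by
  rw [PySem.List.pyRange_one, List.foldl_map, PySem.List.foldl_add]
  unfold sumIdx
  rw [show ((b : Int) - ((a : Int) + 1)).toNat = b - (a + 1) from by omega]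
  rw [zero_add]
  congr 1
  apply List.map_congr_left
  intro k _
  rw [show (a : Int) + 1 + (k : Int) = ((a + 1 + k : Nat) : Int) from by push_cast; ring,
    PySem.List.pyGetD_natCast]

def maxF (mx : Int) (ss : List Int) : Int :=
  ss.foldl (fun m s => if s > m then s else m) mx
def sumsFrom (cur : Int) : List Int → List Int
  | [] => []
  | x :: xs => if x = 0 then cur :: sumsFrom 0 xs else sumsFrom (cur + x) xs
def allSegs : List Int → List Int
  | [] => []
  | x :: xs => if x = 0 then sumsFrom 0 xs else allSegs xs
def gseg (lst : List Int) (cur : Int) : List Int :=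
  match zIdx lst with
  | [] => []
  | i :: _ => (cur + sumIdx lst 0 i) :: pairsS lst (zIdx lst)

theorem gseg_eq_sumsFrom (lst : List Int) : ∀ cur : Int, gseg lst cur = sumsFrom cur lst := by
  induction lst with
  | nil => intro cur; simp [gseg, zIdx, sumsFrom]
  | cons x xs ih =>
    intro cur
    by_cases hx : x = 0
    · subst hx
      rcases hz : zIdx xs with _ | ⟨i, t⟩
      · have h0 : sumsFrom 0 xs = [] := by rw [← ih 0]; simp [gseg, hz]
        have hcons : zIdx ((0 : Int) :: xs) = [0] := by rw [zIdx_cons]; simp [hz]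
        simp [gseg, hcons, sumsFrom, h0, pairsS, sumIdx]
      · have hcons : zIdx ((0 : Int) :: xs) = 0 :: (i + 1) :: t.map (· + 1) := by
          rw [zIdx_cons]; simp [hz]
        have hmap : (i + 1) :: t.map (· + 1) = (i :: t).map (· + 1) := by simp
        have htail : pairsS ((0 : Int) :: xs) (0 :: (i + 1) :: t.map (· + 1)) =
            sumsFrom 0 xs := by
          unfold pairsS
          simp only [List.tail_cons, List.zip_cons_cons, List.map_cons]
          have h2 : (((i + 1) :: t.map (· + 1)).zip (t.map (· + 1))).map
              (fun p => sumIdx ((0 : Int) :: xs) (p.1 + 1) p.2) =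
              pairsS ((0 : Int) :: xs) ((i :: t).map (· + 1)) := by
            unfold pairsS; rw [hmap, ← List.map_tail]; simp
          rw [h2, pairsS_shift]
          have h1 : sumIdx ((0 : Int) :: xs) (0 + 1) (i + 1) = sumIdx xs 0 i :=
            sumIdx_shift 0 xs 0 i
          rw [h1]
          have := ih 0
          simp only [gseg, hz, zero_add] at this
          rw [← this]
        rw [show sumsFrom cur ((0 : Int) :: xs) = cur :: sumsFrom 0 xs from by simp [sumsFrom]]
        simp only [gseg, hcons]
        rw [htail]
        congr 1
        simp [sumIdx]
    · rcases hz : zIdx xs with _ | ⟨i, t⟩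
      · have hcons : zIdx (x :: xs) = [] := by rw [zIdx_cons]; simp [hx, hz]
        have h0 : sumsFrom (cur + x) xs = [] := by rw [← ih (cur + x)]; simp [gseg, hz]
        simp [gseg, hcons, sumsFrom, hx, h0]
      · have hcons : zIdx (x :: xs) = (i + 1) :: t.map (· + 1) := by
          rw [zIdx_cons]; simp [hx, hz]
        have hmap : (i + 1) :: t.map (· + 1) = (i :: t).map (· + 1) := by simp
        simp only [gseg, hcons]
        rw [sumIdx_zero_succ, hmap, pairsS_shift,
          show cur + (x + sumIdx xs 0 i) = (cur + x) + sumIdx xs 0 i from by ring]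
        have := ih (cur + x)
        simp only [gseg, hz] at this
        rw [this]
        simp [sumsFrom, hx]

theorem pairsS_zIdx_eq_allSegs (lst : List Int) : pairsS lst (zIdx lst) = allSegs lst := by
  induction lst with
  | nil => simp [pairsS, zIdx, allSegs]
  | cons x xs ih =>
    by_cases hx : x = 0
    · subst hx
      rcases hz : zIdx xs with _ | ⟨i, t⟩
      · have h0 : sumsFrom 0 xs = [] := by rw [← gseg_eq_sumsFrom xs 0]; simp [gseg, hz]
        have hcons : zIdx ((0 : Int) :: xs) = [0] := by rw [zIdx_cons]; simp [hz]
        simp [pairsS, hcons, allSegs, h0]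
      · have hcons : zIdx ((0 : Int) :: xs) = 0 :: (i + 1) :: t.map (· + 1) := by
          rw [zIdx_cons]; simp [hz]
        have hmap : (i + 1) :: t.map (· + 1) = (i :: t).map (· + 1) := by simp
        rw [hcons]
        unfold pairsS
        simp only [List.tail_cons, List.zip_cons_cons, List.map_cons]
        have h2 : (((i + 1) :: t.map (· + 1)).zip (t.map (· + 1))).map
            (fun p => sumIdx ((0 : Int) :: xs) (p.1 + 1) p.2) =
            pairsS ((0 : Int) :: xs) ((i :: t).map (· + 1)) := by
          unfold pairsS; rw [hmap, ← List.map_tail]; simp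
        rw [h2, pairsS_shift]
        have h1 : sumIdx ((0 : Int) :: xs) (0 + 1) (i + 1) = sumIdx xs 0 i :=
          sumIdx_shift 0 xs 0 i
        rw [h1]
        have hg := gseg_eq_sumsFrom xs 0
        simp only [gseg, hz, zero_add] at hg
        rw [show allSegs ((0:Int) :: xs) = sumsFrom 0 xs from by simp [allSegs], ← hg]
    · have hcons : zIdx (x :: xs) = (zIdx xs).map (· + 1) := by
        rw [zIdx_cons]; simp [hx]
      rw [hcons, pairsS_shift, ih]
      simp [allSegs, hx]

theorem maxF_cons (mx s : Int) (t : List Int) :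
    maxF mx (s :: t) = maxF (if s > mx then s else mx) t := rfl

theorem foldB_true (l : List Int) : ∀ mx cur : Int,
    (l.foldl (fun (st : Int × Int × Bool) x =>
      if x == 0 then
        (if st.2.2 && decide (st.2.1 > st.1) then st.2.1 else st.1, 0, true)
      else (st.1, st.2.1 + x, st.2.2)) (mx, cur, true)).1 = maxF mx (sumsFrom cur l) := by
  induction l with
  | nil => intro mx cur; simp [maxF, sumsFrom]
  | cons x xs ih =>
    intro mx cur
    rw [List.foldl_cons]
    by_cases hx : x = 0
    · subst hx
      rw [if_pos (by simp : ((0:Int) == 0) = true)]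
      rw [show sumsFrom cur ((0:Int) :: xs) = cur :: sumsFrom 0 xs from by simp [sumsFrom],
        maxF_cons, ← ih]
      by_cases h : cur > mx <;> simp [h]
    · rw [if_neg (show ¬ ((x == 0) = true) from by simp [hx])]
      rw [ih, show sumsFrom cur (x :: xs) = sumsFrom (cur + x) xs from by simp [sumsFrom, hx]]

theorem foldB_false (l : List Int) : ∀ mx cur : Int,
    (l.foldl (fun (st : Int × Int × Bool) x =>
      if x == 0 then
        (if st.2.2 && decide (st.2.1 > st.1) then st.2.1 else st.1, 0, true)
      else (st.1, st.2.1 + x, st.2.2)) (mx, cur, false)).1 = maxF mx (allSegs l) := by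
  induction l with
  | nil => intro mx cur; simp [maxF, allSegs]
  | cons x xs ih =>
    intro mx cur
    rw [List.foldl_cons]
    by_cases hx : x = 0
    · subst hx
      rw [if_pos (by simp : ((0:Int) == 0) = true)]
      rw [show allSegs ((0:Int) :: xs) = sumsFrom 0 xs from by simp [allSegs]]
      exact foldB_true xs mx 0
    · rw [if_neg (show ¬ ((x == 0) = true) from by simp [hx])]
      rw [ih, show allSegs (x :: xs) = allSegs xs from by simp [allSegs, hx]]

theorem alt_eq (lst : List Int) : biggest_sum_alt lst = maxF (-1) (allSegs lst) := by
  unfold biggest_sum_alt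
  exact foldB_false lst (-1) 0

theorem pyGetD_map_cast (Z : List Nat) (k : Nat) (hk : k < Z.length) :
    PySem.List.pyGetD (Z.map (Nat.cast : Nat → Int)) (k : Int) 0 = ((Z.getD k 0 : Nat) : Int) := by
  rw [PySem.List.pyGetD_natCast]
  simp [List.getD_eq_getElem?_getD, List.getElem?_map, List.getElem?_eq_getElem hk]

theorem a_eq (lst : List Int) : biggest_sum lst = maxF (-1) (pairsS lst (zIdx lst)) := by
  unfold biggest_sum
  simp only [zero_indices_eq]
  generalize zIdx lst = Z
  cases Z with
  | nil =>
    rw [show (((List.map (Nat.cast : Nat → Int) ([] : List Nat)).length : Int) - 1) = -1 from by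
      simp]
    rw [PySem.List.pyRange_one_eq_nil (by norm_num)]
    simp [pairsS, maxF]
  | cons z0 Zt =>
    have hlen : (((List.map (Nat.cast : Nat → Int) (z0 :: Zt)).length : Int) - 1)
        = (((z0 :: Zt).length - 1 : Nat) : Int) := by
      rw [List.length_map, List.length_cons]; omega
    rw [hlen, PySem.List.pyRange_zero_natCast, List.foldl_map]
    have hstep : ∀ k ∈ List.range ((z0 :: Zt).length - 1), ∀ mx : Int,
        (if (PySem.List.pyRange
              (PySem.List.pyGetD ((z0 :: Zt).map (Nat.cast : Nat → Int)) ((k : Nat) : Int) 0 + 1)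
              (PySem.List.pyGetD ((z0 :: Zt).map (Nat.cast : Nat → Int)) (((k : Nat) : Int) + 1) 0) 1).foldl
              (fun s j => s + PySem.List.pyGetD lst j 0) 0 > mx then
          (PySem.List.pyRange
              (PySem.List.pyGetD ((z0 :: Zt).map (Nat.cast : Nat → Int)) ((k : Nat) : Int) 0 + 1)
              (PySem.List.pyGetD ((z0 :: Zt).map (Nat.cast : Nat → Int)) (((k : Nat) : Int) + 1) 0) 1).foldl
              (fun s j => s + PySem.List.pyGetD lst j 0) 0
        else mx)
        = (fun (mx : Int) (p : Nat × Nat) =>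
            if sumIdx lst (p.1 + 1) p.2 > mx then sumIdx lst (p.1 + 1) p.2 else mx) mx
          ((z0 :: Zt).getD k 0, (z0 :: Zt).getD (k + 1) 0) := by
      intro k hk mx
      rw [List.mem_range] at hk
      have h1 := pyGetD_map_cast (z0 :: Zt) k (by simp at hk ⊢; omega)
      have h2 : PySem.List.pyGetD ((z0 :: Zt).map (Nat.cast : Nat → Int)) (((k : Nat) : Int) + 1) 0
          = (((z0 :: Zt).getD (k + 1) 0 : Nat) : Int) := by
        rw [show (((k : Nat) : Int) + 1) = (((k + 1 : Nat) : Nat) : Int) from by push_cast; ring]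
        exact pyGetD_map_cast (z0 :: Zt) (k + 1) (by simp at hk ⊢; omega)
      rw [h1, h2, inner_sum_eq]
    rw [PySem.List.foldl_congr_mem' _ _
      (fun (mx : Int) (k : Nat) =>
        (fun (mx : Int) (p : Nat × Nat) =>
            if sumIdx lst (p.1 + 1) p.2 > mx then sumIdx lst (p.1 + 1) p.2 else mx) mx
          ((z0 :: Zt).getD k 0, (z0 :: Zt).getD (k + 1) 0)) _
      (by intro k hk mx; exact hstep k hk mx)]
    unfold maxF pairsS
    rw [List.foldl_map, ← zip_pairs_eq, List.foldl_map]

-- ===== VERDICT (by name: the statement is the Claim_ definition above) =====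
theorem biggest_sum_spec : Claim_equal_biggest_sum := by
  intro lst _
  unfold Spec_biggest_sum
  rw [a_eq, alt_eq, pairsS_zIdx_eq_allSegs]
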